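-- pv_equiv track=rewrite | github.com/5y5F4il/torrFind | darkhold.py | convert
-- ===== SOURCE A (Python) =====
-- def convert(lf,symb):
--     a = 0
--     lf0 = ""
--     b = str(symb)
--     while a < len(lf):
--         lf0 = lf0 + b + lf[a]
--         a = a + 1
--     return lf0
-- ===== SOURCE B (Python) =====
-- def convert(lf, symb):
--     b = str(symb)
--     return b + b.join(lf) if lf else ""
-- ===== Notes on version B (the rewrite author's own statement) =====
-- stated objective: faster
-- what changed: Replaces the index-driven while loop that grows a string one character at a time with a single closed expression using str.join (separator semantics plus one prepended copy), guarded for the empty string.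
import Mathlib
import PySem

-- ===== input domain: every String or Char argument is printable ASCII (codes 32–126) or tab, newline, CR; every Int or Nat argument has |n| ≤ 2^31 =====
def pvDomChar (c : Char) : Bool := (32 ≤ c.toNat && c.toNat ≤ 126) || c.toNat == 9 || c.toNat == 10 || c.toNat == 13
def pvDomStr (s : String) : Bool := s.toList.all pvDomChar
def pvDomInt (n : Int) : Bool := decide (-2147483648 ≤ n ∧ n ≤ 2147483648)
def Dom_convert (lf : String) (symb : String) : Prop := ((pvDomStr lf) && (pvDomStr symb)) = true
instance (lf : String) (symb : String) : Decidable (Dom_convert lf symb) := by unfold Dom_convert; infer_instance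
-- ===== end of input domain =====

-- B rewrites A's index-driven accumulation loop as one closed str.join expression; return values proven equal.

-- ===== PORT A =====
-- the while loop 'a < len(lf): lf0 = lf0 + b + lf[a]; a += 1' visits lf's characters in order:
-- ported as a left fold over lf's character list with the same accumulator lf0
def convert (lf : String) (symb : String) : String :=
  String.mk (lf.toList.foldl (fun lf0 c => lf0 ++ symb.toList ++ [c]) [])

-- ===== PORT B =====
-- 'b + b.join(lf) if lf else ""' (str(symb) on a str is symb itself)
def convert_alt (lf : String) (symb : String) : String :=
  if lf.toList = [] then ""
  else String.mk (symb.toList ++ PySem.Chars.join symb.toList (lf.toList.map (fun c => [c])))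

-- ===== PRECONDITION & SPEC =====
def Spec_convert (lf : String) (symb : String) (out : String) : Prop := out = convert_alt lf symb
instance (lf : String) (symb : String) (out : String) : Decidable (Spec_convert lf symb out) := by unfold Spec_convert; infer_instance

-- ===== CLAIM (what is proved, stated in full; the proofs are below) =====
def Claim_equal_convert : Prop := ∀ (lf : String) (symb : String), Dom_convert lf symb → Spec_convert lf symb (convert lf symb)

-- ===== LEMMAS AND PROOFS =====

-- A's loop appends b ++ [c] for each character
theorem convert_foldl_eq (b : List Char) :
    ∀ (cs acc : List Char),
      cs.foldl (fun lf0 c => lf0 ++ b ++ [c]) acc = acc ++ cs.flatMap (fun c => b ++ [c]) := by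
  intro cs
  induction cs with
  | nil => simp
  | cons c cs ih => intro acc; simp [List.foldl_cons, List.flatMap, List.append_assoc]

-- join's separator semantics plus one prepended b yields the same flatMap
theorem join_prepend_eq (b : List Char) :
    ∀ (c : Char) (cs : List Char),
      b ++ PySem.Chars.join b ((c :: cs).map (fun x => [x])) =
        (c :: cs).flatMap (fun x => b ++ [x]) := by
  intro c cs
  induction cs generalizing c with
  | nil => simp [PySem.Chars.join_singleton]
  | cons c' cs ih =>
      simp only [List.map_cons] at ih ⊢
      rw [PySem.Chars.join_cons_cons]
      simp only [List.flatMap_cons] at ih ⊢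
      rw [← ih c']
      simp [List.append_assoc]

-- ===== VERDICT (by name: the statement is the Claim_ definition above) =====
theorem convert_spec : Claim_equal_convert := by
  intro lf symb _
  unfold Spec_convert convert convert_alt
  rw [convert_foldl_eq]
  cases h : lf.toList with
  | nil => rfl
  | cons c cs =>
      rw [if_neg (List.cons_ne_nil c cs), List.nil_append, join_prepend_eq]
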